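-- pv_equiv track=rewrite | github.com/arts-lod/MARC | unimarc_title_visualizer.py | extract_tags
-- ===== SOURCE A (Python) =====
-- def extract_tags(record):
--     lines = record.split('\n')
--     tag_001 = ""
--     tag_500 = ""
--     tag_215 = ""
--
--     for line in lines:
--         if line.startswith('001'):
--             tag_001 = line[4:].strip()
--         elif line.startswith('500'):
--             tag_500 = line[4:].strip()
--         elif line.startswith('215'):
--             tag_215 = line[4:].strip()
--
--     return tag_001, tag_500, tag_215
-- ===== SOURCE B (Python) =====
-- def extract_tags(record):
--     lines = record.split('\n')
--
--     def last_match(tag):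
--         # scan back-to-front; the first hit is the last occurrence, stop early
--         for line in reversed(lines):
--             if line.startswith(tag):
--                 return line[4:].strip()
--         return ""
--
--     return last_match('001'), last_match('500'), last_match('215')
-- ===== Notes on version B (the rewrite author's own statement) =====
-- stated objective: alternative
-- what changed: Replaces A's single forward pass with a three-variable elif accumulator by three independent backward scans with early exit: for each tag, walk the lines in reverse and return the first (i.e. last-occurring) matching line's stripped payload; correct because the three 3-char prefixes are mutually exclusive per line.
import Mathlib
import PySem

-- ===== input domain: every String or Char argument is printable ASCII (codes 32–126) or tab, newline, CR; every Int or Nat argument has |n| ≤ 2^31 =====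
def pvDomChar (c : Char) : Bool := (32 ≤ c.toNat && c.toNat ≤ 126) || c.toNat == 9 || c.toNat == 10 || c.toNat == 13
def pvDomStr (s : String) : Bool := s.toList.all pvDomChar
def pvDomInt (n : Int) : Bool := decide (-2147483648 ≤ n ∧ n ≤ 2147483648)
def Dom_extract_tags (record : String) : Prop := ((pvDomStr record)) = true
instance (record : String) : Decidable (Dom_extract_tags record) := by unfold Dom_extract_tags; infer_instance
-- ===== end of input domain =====

-- B replaces A's single forward pass with three independent backward scans with early exit (alternative decomposition, same cost).


-- ===== PORT A =====
-- one step of A's for-loop: the elif chain over the three tag accumulators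
def extractTagsStepA (st : String × String × String) (line : String) : String × String × String :=
  if PySem.Str.startswith line "001" then
    (PySem.Str.strip (PySem.Str.slice line (some 4) none), st.2.1, st.2.2)
  else if PySem.Str.startswith line "500" then
    (st.1, PySem.Str.strip (PySem.Str.slice line (some 4) none), st.2.2)
  else if PySem.Str.startswith line "215" then
    (st.1, st.2.1, PySem.Str.strip (PySem.Str.slice line (some 4) none))
  else st

def extract_tags (record : String) : String × String × String :=
  ((PySem.Str.split? record "\n").getD []).foldl extractTagsStepA ("", "", "")

-- ===== PORT B =====
-- B's last_match: scan the reversed line list, return at the first (= last-occurring) match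
def lastMatch (tag : String) : List String → String
  | [] => ""
  | line :: rest =>
      if PySem.Str.startswith line tag then PySem.Str.strip (PySem.Str.slice line (some 4) none)
      else lastMatch tag rest

def extract_tags_alt (record : String) : String × String × String :=
  let lines := (PySem.Str.split? record "\n").getD []
  (lastMatch "001" lines.reverse, lastMatch "500" lines.reverse, lastMatch "215" lines.reverse)

-- ===== PRECONDITION & SPEC =====
def Spec_extract_tags (record : String) (out : String × String × String) : Prop := out = extract_tags_alt record
instance (record : String) (out : String × String × String) : Decidable (Spec_extract_tags record out) := by unfold Spec_extract_tags; infer_instance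

-- ===== CLAIM (what is proved, stated in full; the proofs are below) =====
def Claim_equal_extract_tags : Prop := ∀ (record : String), Dom_extract_tags record → Spec_extract_tags record (extract_tags record)

-- ===== LEMMAS AND PROOFS =====

-- lastMatch with an arbitrary default, for the loop invariant
def lastMatchD (tag d : String) : List String → String
  | [] => d
  | line :: rest =>
      if PySem.Str.startswith line tag then PySem.Str.strip (PySem.Str.slice line (some 4) none)
      else lastMatchD tag d rest

lemma lastMatch_eq_D (tag : String) (l : List String) : lastMatch tag l = lastMatchD tag "" l := by
  induction l with
  | nil => rfl
  | cons x rest ih => simp [lastMatch, lastMatchD, ih]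

-- startswith with a 3-char tag is the same test as "the 3-char slice equals the tag"
lemma startswith_iff_slice3 (line tag : String) (h : tag.toList.length = 3) :
    PySem.Str.startswith line tag = true ↔ PySem.Str.slice line none (some 3) = tag := by
  have htake : (PySem.Str.slice line none (some 3)).toList = line.toList.take 3 := by
    simp [pysem, PySem.List.slice_to]
  rw [← String.toList_inj, htake]
  rw [show PySem.Str.startswith line tag = PySem.Chars.startswith line.toList tag.toList by simp]
  rw [PySem.Chars.startswith_iff, List.prefix_iff_eq_take, h]
  exact eq_comm

-- two distinct 3-char tags cannot both be prefixes of one line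
lemma sw_excl (line t1 t2 : String) (h1 : t1.toList.length = 3) (h2 : t2.toList.length = 3)
    (hne : t1 ≠ t2) (h : PySem.Str.startswith line t1 = true) :
    PySem.Str.startswith line t2 = false := by
  by_contra hc
  have hb : PySem.Str.startswith line t2 = true := by
    cases hx : PySem.Str.startswith line t2 <;> simp_all
  exact hne (((startswith_iff_slice3 line t1 h1).mp h).symm.trans
    ((startswith_iff_slice3 line t2 h2).mp hb))

-- loop invariant: A's forward fold from (a,b,c) equals B's three backward scans with defaults a,b,c
lemma loop_inv (lines : List String) : ∀ a b c : String,
    lines.foldl extractTagsStepA (a, b, c) =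
      (lastMatchD "001" a lines.reverse, lastMatchD "500" b lines.reverse,
       lastMatchD "215" c lines.reverse) := by
  induction lines using List.reverseRecOn with
  | nil => intro a b c; simp [lastMatchD]
  | append_singleton rest x ih =>
    intro a b c
    rw [List.foldl_append, ih]
    simp only [List.foldl_cons, List.foldl_nil, List.reverse_append, List.reverse_cons,
      List.reverse_nil, List.nil_append, List.cons_append]
    unfold extractTagsStepA
    by_cases h1 : PySem.Str.startswith x "001" = true
    · have h5 := sw_excl x "001" "500" (by decide) (by decide) (by decide) h1
      have h2 := sw_excl x "001" "215" (by decide) (by decide) (by decide) h1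
      have c1 : PySem.Chars.startswith x.toList ['0','0','1'] = true := by simpa using h1
      have c5 : PySem.Chars.startswith x.toList ['5','0','0'] = false := by simpa using h5
      have c2 : PySem.Chars.startswith x.toList ['2','1','5'] = false := by simpa using h2
      simp [lastMatchD, c1, c5, c2]
    · have c1 : PySem.Chars.startswith x.toList ['0','0','1'] = false := by
        simpa using (Bool.eq_false_iff.mpr (by simpa using h1) : PySem.Str.startswith x "001" = false)
      by_cases h5 : PySem.Str.startswith x "500" = true
      · have h2 := sw_excl x "500" "215" (by decide) (by decide) (by decide) h5
        have c5 : PySem.Chars.startswith x.toList ['5','0','0'] = true := by simpa using h5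
        have c2 : PySem.Chars.startswith x.toList ['2','1','5'] = false := by simpa using h2
        simp [lastMatchD, c1, c5, c2]
      · have c5 : PySem.Chars.startswith x.toList ['5','0','0'] = false := by
          simpa using (Bool.eq_false_iff.mpr (by simpa using h5) : PySem.Str.startswith x "500" = false)
        by_cases h2 : PySem.Str.startswith x "215" = true
        · have c2 : PySem.Chars.startswith x.toList ['2','1','5'] = true := by simpa using h2
          simp [lastMatchD, c1, c5, c2]
        · have c2 : PySem.Chars.startswith x.toList ['2','1','5'] = false := by
            simpa using (Bool.eq_false_iff.mpr (by simpa using h2) : PySem.Str.startswith x "215" = false)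
          simp [lastMatchD, c1, c5, c2]

-- ===== VERDICT (by name: the statement is the Claim_ definition above) =====
theorem extract_tags_spec : Claim_equal_extract_tags := by
  intro record _
  show _ = _
  unfold extract_tags extract_tags_alt
  rw [loop_inv]
  simp [lastMatch_eq_D]
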